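-- pv_equiv track=rewrite | github.com/mathsmm/py-hamming | hamming_eternity.py | criar_quadro
-- ===== SOURCE A (Python) =====
-- def paridade(conjunto,bits):
--     soma = 0
--     for bit in conjunto:
--         soma += int(bits[bit])
--     if soma % 2 == 0:
--         return True
--     else:
--         return False
--
-- def criar_quadro(bits):
--     hamming = ''
--     checks = {
--         0:[0,1,2,3,4,5,6,7,8,9,10,11,12,13,14],
--         1:[1,4,8,0,3,6,10],
--         2:[2,5,9,0,3,6,10],
--         4:[1,2,3,7,8,9,10],
--         8:[4,5,6,7,8,9,10]
--     }
--     n = 0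
--     for bit in range(16):
--         if bit in [1,2,4,8]:
--             if paridade(checks[bit],bits):
--                 hamming += '0'
--             else:
--                 hamming += '1'
--         elif bit != 0:
--             hamming += bits[n]
--             n += 1
--     if paridade(checks[0],hamming):
--         hamming = '0' + hamming
--     else:
--         hamming = '1' + hamming
--     return hamming
-- ===== SOURCE B (Python) =====
-- def criar_quadro(bits):
--     frame = [None] * 16
--     data_pos = [3, 5, 6, 7, 9, 10, 11, 12, 13, 14, 15]
--     for i, p in enumerate(data_pos):
--         frame[p] = bits[i]
--     s = 0
--     for p in data_pos:
--         s ^= p * (int(frame[p]) % 2)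
--     for k in range(4):
--         frame[1 << k] = str((s >> k) & 1)
--     total = 0
--     for p in range(1, 16):
--         total ^= int(frame[p]) % 2
--     frame[0] = str(total)
--     return ''.join(frame)
-- ===== Notes on version B (the rewrite author's own statement) =====
-- stated objective: alternative
-- what changed: B replaces A's per-parity index-set sums inside one interleaved range(16) dispatch loop by the classic Hamming syndrome construction: place the data digits into a 16-slot frame, accumulate a single syndrome as the XOR of each data position weighted by its digit's parity, read the four parity bits off the syndrome's binary bits, and set the overall bit by an XOR fold over the frame.
import Mathlib
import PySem

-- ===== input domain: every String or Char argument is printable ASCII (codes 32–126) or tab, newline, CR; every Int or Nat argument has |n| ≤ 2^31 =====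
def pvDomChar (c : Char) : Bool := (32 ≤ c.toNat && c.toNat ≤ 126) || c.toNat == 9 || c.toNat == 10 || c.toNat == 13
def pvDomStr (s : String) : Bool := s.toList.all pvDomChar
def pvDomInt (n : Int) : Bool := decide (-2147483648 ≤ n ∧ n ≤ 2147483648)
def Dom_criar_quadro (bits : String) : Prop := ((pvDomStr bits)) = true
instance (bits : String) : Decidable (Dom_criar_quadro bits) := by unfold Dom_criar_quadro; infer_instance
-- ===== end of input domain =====

-- B encodes by the classic Hamming syndrome method — XOR of the positions of odd data digits,
-- parity bits read off the syndrome's bits, overall parity as an XOR fold over the frame —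
-- instead of A's per-parity index-set sums in one interleaved range(16) dispatch loop; objective: alternative.

-- ===== PORT A =====
def paridade (conjunto : List Int) (bits : List Char) : Option Bool :=
  (conjunto.foldl (fun acc bit =>
      acc.bind fun soma =>
        (PySem.List.pyGet? bits bit).bind fun ch =>
          (PySem.Int.ofChars? [ch]).map fun v => soma + v) (some 0)).map
    (fun soma => PySem.Int.mod soma 2 == 0)

def pvChecks : PySem.Dict Int (List Int) :=
  (((((PySem.Dict.empty).insert 0 [0,1,2,3,4,5,6,7,8,9,10,11,12,13,14]).insert 1
      [1,4,8,0,3,6,10]).insert 2 [2,5,9,0,3,6,10]).insert 4 [1,2,3,7,8,9,10]).insert 8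
      [4,5,6,7,8,9,10]

def criar_quadro (bits : String) : String :=
  let bs := bits.toList
  let step : Option (List Char × Int) → Int → Option (List Char × Int) := fun st bit =>
    st.bind fun hn =>
      if bit ∈ ([1,2,4,8] : List Int) then
        (paridade (PySem.Dict.getD pvChecks bit []) bs).map
          (fun p => (hn.1 ++ [if p then '0' else '1'], hn.2))
      else if bit ≠ 0 then
        (PySem.List.pyGet? bs hn.2).map (fun c => (hn.1 ++ [c], hn.2 + 1))
      else st
  (((PySem.List.pyRange 0 16 1).foldl step (some ([], 0))).bind fun hn =>
    (paridade (PySem.Dict.getD pvChecks 0 []) hn.1).map fun p =>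
      String.ofList ((if p then '0' else '1') :: hn.1)).getD ""

-- ===== PORT B =====
-- Slot indices (data positions, 1 << k, range(1,16)) are nonnegative literals, so `.toNat`
-- on them is exact here; `s >> k`, `s & 1`, `s ^ p` are ported with Lean's `>>>` and
-- PySem.Int.band / bxor (Python-exact).
def criar_quadro_alt (bits : String) : String :=
  let bs := bits.toList
  let dataPos : List Int := [3, 5, 6, 7, 9, 10, 11, 12, 13, 14, 15]
  -- frame = [None]*16; data placement pass (frame[p] = bits[i])
  let frame1 : Option (List (List Char)) :=
    (PySem.List.enumerate dataPos).foldl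
      (fun acc ip => acc.bind fun f =>
        (PySem.List.pyGet? bs ip.1).map fun c => f.set ip.2.toNat [c])
      (some (List.replicate 16 []))
  -- syndrome pass: s ^= p * (int(frame[p]) % 2)
  let s? : Option Int := frame1.bind fun f =>
    dataPos.foldl
      (fun acc p => acc.bind fun s =>
        (PySem.Int.ofChars? (f.getD p.toNat [])).map fun v =>
          PySem.Int.bxor s (p * PySem.Int.mod v 2))
      (some 0)
  -- parity-bit pass: frame[1 << k] = str((s >> k) & 1)
  let frame2 : Option (List (List Char)) := frame1.bind fun f => s?.map fun s =>
    (PySem.List.pyRange 0 4 1).foldl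
      (fun f k => f.set ((1 : Nat) <<< k.toNat)
          (PySem.Int.toChars (PySem.Int.band (s >>> k.toNat) 1))) f
  -- overall parity pass: total ^= int(frame[p]) % 2 for p in range(1,16)
  let total? : Option Int := frame2.bind fun f =>
    (PySem.List.pyRange 1 16 1).foldl
      (fun acc p => acc.bind fun t =>
        (PySem.Int.ofChars? (f.getD p.toNat [])).map fun v =>
          PySem.Int.bxor t (PySem.Int.mod v 2))
      (some 0)
  let frame3 : Option (List (List Char)) :=
    frame2.bind fun f => total?.map fun t => f.set 0 (PySem.Int.toChars t)
  (frame3.map fun f => String.ofList f.flatten).getD ""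

-- ===== PRECONDITION & SPEC =====
-- Pre_ excludes exactly the inputs on which A raises: fewer than 11 characters (IndexError)
-- or a non-digit among the first 11 characters (ValueError from int()).
def Pre_criar_quadro (bits : String) : Prop :=
  11 ≤ bits.toList.length ∧ (bits.toList.take 11).all Char.isDigit = true
instance (bits : String) : Decidable (Pre_criar_quadro bits) := by
  unfold Pre_criar_quadro; infer_instance

def pvWitness_criar_quadro : String := "10110100101"

def Spec_criar_quadro (bits : String) (out : String) : Prop := out = criar_quadro_alt bits
instance (bits : String) (out : String) : Decidable (Spec_criar_quadro bits out) := by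
  unfold Spec_criar_quadro; infer_instance

-- ===== CLAIM (what is proved, stated in full; the proofs are below) =====
def Claim_equal_criar_quadro : Prop := ∀ (bits : String), Dom_criar_quadro bits → Pre_criar_quadro bits → Spec_criar_quadro bits (criar_quadro bits)

-- ===== LEMMAS AND PROOFS =====
lemma char_eq_of_toNat (c d : Char) (h : c.toNat = d.toNat) : c = d := by
  apply Char.ext; exact UInt32.toNat_inj.mp h

lemma mem_digits_of_isDigit (c : Char) (h : c.isDigit = true) :
    c ∈ ['0','1','2','3','4','5','6','7','8','9'] := by
  simp [Char.isDigit] at h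
  obtain ⟨h1, h2⟩ := h
  have h1' : 48 ≤ c.toNat := h1
  have h2' : c.toNat ≤ 57 := h2
  obtain ⟨n, hn⟩ : ∃ n, c.toNat = n := ⟨_, rfl⟩
  rw [hn] at h1' h2'
  interval_cases n <;>
    first
    | (rw [char_eq_of_toNat c '0' (by rw [hn]; decide)]; decide)
    | (rw [char_eq_of_toNat c '1' (by rw [hn]; decide)]; decide)
    | (rw [char_eq_of_toNat c '2' (by rw [hn]; decide)]; decide)
    | (rw [char_eq_of_toNat c '3' (by rw [hn]; decide)]; decide)
    | (rw [char_eq_of_toNat c '4' (by rw [hn]; decide)]; decide)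
    | (rw [char_eq_of_toNat c '5' (by rw [hn]; decide)]; decide)
    | (rw [char_eq_of_toNat c '6' (by rw [hn]; decide)]; decide)
    | (rw [char_eq_of_toNat c '7' (by rw [hn]; decide)]; decide)
    | (rw [char_eq_of_toNat c '8' (by rw [hn]; decide)]; decide)
    | (rw [char_eq_of_toNat c '9' (by rw [hn]; decide)]; decide)

lemma ofChars?_digit (c : Char) (h : c.isDigit = true) :
    PySem.Int.ofChars? [c] = some ((c.toNat : Int) - 48) := by
  have hm := mem_digits_of_isDigit c h
  fin_cases hm <;> decide

lemma ofChars?_ifP {P : Prop} [Decidable P] :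
    PySem.Int.ofChars? [if P then '0' else '1'] = some (if P then (0:Int) else 1) := by
  split <;> decide

lemma parse_band_one (x : Int) :
    PySem.Int.ofChars? (PySem.Int.toChars (PySem.Int.band x 1)) =
      some (PySem.Int.band x 1) := by
  rw [PySem.Int.band_one]
  rcases PySem.Int.mod_two_eq x with h | h <;> rw [h] <;> decide

lemma dvd_overall (t1 t2 t4 t8 a0 a1 a2 a3 a4 a5 a6 a7 a8 a9 a10 : Int) :
    (2 ∣ (t1 + t2 + a0 + t4 + a1 + a2 + a3 + t8 + a4 + a5 + a6 + a7 + a8 + a9 + a10)) ↔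
    (2 ∣ (t1 + t2 + a0 % 2 + t4 + a1 % 2 + a2 % 2 + a3 % 2 + t8 + a4 % 2 + a5 % 2 + a6 % 2 +
      a7 % 2 + a8 % 2 + a9 % 2 + a10 % 2)) := by omega

set_option maxHeartbeats 4000000 in
lemma criar_quadro_core (c0 c1 c2 c3 c4 c5 c6 c7 c8 c9 c10 : Char) (rest : List Char)
    (hd : ∀ c ∈ [c0,c1,c2,c3,c4,c5,c6,c7,c8,c9,c10],
        PySem.Int.ofChars? [c] = some ((c.toNat : Int) - 48)) :
    criar_quadro (String.ofList (c0::c1::c2::c3::c4::c5::c6::c7::c8::c9::c10::rest)) =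
    criar_quadro_alt (String.ofList (c0::c1::c2::c3::c4::c5::c6::c7::c8::c9::c10::rest)) := by
  have hr16 : PySem.List.pyRange 0 16 1 = [0,1,2,3,4,5,6,7,8,9,10,11,12,13,14,15] := by decide
  have hr4 : PySem.List.pyRange 0 4 1 = [0,1,2,3] := by decide
  have hr115 : PySem.List.pyRange 1 16 1 = [1,2,3,4,5,6,7,8,9,10,11,12,13,14,15] := by decide
  have hk0 : PySem.Dict.getD pvChecks 0 [] = [0,1,2,3,4,5,6,7,8,9,10,11,12,13,14] := by decide
  have hk1 : PySem.Dict.getD pvChecks 1 [] = [1,4,8,0,3,6,10] := by decide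
  have hk2 : PySem.Dict.getD pvChecks 2 [] = [2,5,9,0,3,6,10] := by decide
  have hk4 : PySem.Dict.getD pvChecks 4 [] = [1,2,3,7,8,9,10] := by decide
  have hk8 : PySem.Dict.getD pvChecks 8 [] = [4,5,6,7,8,9,10] := by decide
  have g0 : PySem.List.pyGet? (c0::c1::c2::c3::c4::c5::c6::c7::c8::c9::c10::rest) (0:Int) = some c0 := by
    simpa using PySem.List.pyGet?_ofNat (xs := c0::c1::c2::c3::c4::c5::c6::c7::c8::c9::c10::rest) (n := 0) (by simp)
  have g1 : PySem.List.pyGet? (c0::c1::c2::c3::c4::c5::c6::c7::c8::c9::c10::rest) (1:Int) = some c1 := by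
    simpa using PySem.List.pyGet?_ofNat (xs := c0::c1::c2::c3::c4::c5::c6::c7::c8::c9::c10::rest) (n := 1) (by simp)
  have g2 : PySem.List.pyGet? (c0::c1::c2::c3::c4::c5::c6::c7::c8::c9::c10::rest) (2:Int) = some c2 := by
    simpa using PySem.List.pyGet?_ofNat (xs := c0::c1::c2::c3::c4::c5::c6::c7::c8::c9::c10::rest) (n := 2) (by simp)
  have g3 : PySem.List.pyGet? (c0::c1::c2::c3::c4::c5::c6::c7::c8::c9::c10::rest) (3:Int) = some c3 := by
    simpa using PySem.List.pyGet?_ofNat (xs := c0::c1::c2::c3::c4::c5::c6::c7::c8::c9::c10::rest) (n := 3) (by simp)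
  have g4 : PySem.List.pyGet? (c0::c1::c2::c3::c4::c5::c6::c7::c8::c9::c10::rest) (4:Int) = some c4 := by
    simpa using PySem.List.pyGet?_ofNat (xs := c0::c1::c2::c3::c4::c5::c6::c7::c8::c9::c10::rest) (n := 4) (by simp)
  have g5 : PySem.List.pyGet? (c0::c1::c2::c3::c4::c5::c6::c7::c8::c9::c10::rest) (5:Int) = some c5 := by
    simpa using PySem.List.pyGet?_ofNat (xs := c0::c1::c2::c3::c4::c5::c6::c7::c8::c9::c10::rest) (n := 5) (by simp)
  have g6 : PySem.List.pyGet? (c0::c1::c2::c3::c4::c5::c6::c7::c8::c9::c10::rest) (6:Int) = some c6 := by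
    simpa using PySem.List.pyGet?_ofNat (xs := c0::c1::c2::c3::c4::c5::c6::c7::c8::c9::c10::rest) (n := 6) (by simp)
  have g7 : PySem.List.pyGet? (c0::c1::c2::c3::c4::c5::c6::c7::c8::c9::c10::rest) (7:Int) = some c7 := by
    simpa using PySem.List.pyGet?_ofNat (xs := c0::c1::c2::c3::c4::c5::c6::c7::c8::c9::c10::rest) (n := 7) (by simp)
  have g8 : PySem.List.pyGet? (c0::c1::c2::c3::c4::c5::c6::c7::c8::c9::c10::rest) (8:Int) = some c8 := by
    simpa using PySem.List.pyGet?_ofNat (xs := c0::c1::c2::c3::c4::c5::c6::c7::c8::c9::c10::rest) (n := 8) (by simp)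
  have g9 : PySem.List.pyGet? (c0::c1::c2::c3::c4::c5::c6::c7::c8::c9::c10::rest) (9:Int) = some c9 := by
    simpa using PySem.List.pyGet?_ofNat (xs := c0::c1::c2::c3::c4::c5::c6::c7::c8::c9::c10::rest) (n := 9) (by simp)
  have g10 : PySem.List.pyGet? (c0::c1::c2::c3::c4::c5::c6::c7::c8::c9::c10::rest) (10:Int) = some c10 := by
    simpa using PySem.List.pyGet?_ofNat (xs := c0::c1::c2::c3::c4::c5::c6::c7::c8::c9::c10::rest) (n := 10) (by simp)
  simp only [criar_quadro, criar_quadro_alt, paridade, String.toList_ofList, hr16, hr4, hr115,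
    hk0, PySem.List.enumerate]
  simp [g0, g1, g2, g3, g4, g5, g6, g7, g8, g9, g10,
    hd c0 (by simp), hd c1 (by simp), hd c2 (by simp), hd c3 (by simp), hd c4 (by simp),
    hd c5 (by simp), hd c6 (by simp), hd c7 (by simp), hd c8 (by simp), hd c9 (by simp),
    hd c10 (by simp), hk1, hk2, hk4, hk8, List.replicate, List.set,
    ofChars?_ifP, parse_band_one, ← String.ofList_append]
  have e1 : (2 ∣ (((c1.toNat : Int) - 48) + ((c4.toNat : Int) - 48) + ((c8.toNat : Int) - 48) + ((c0.toNat : Int) - 48) + ((c3.toNat : Int) - 48) + ((c6.toNat : Int) - 48) + ((c10.toNat : Int) - 48))) ↔ (2 ∣ (((c1.toNat : Int) - 48) % 2 + ((c4.toNat : Int) - 48) % 2 + ((c8.toNat : Int) - 48) % 2 + ((c0.toNat : Int) - 48) % 2 + ((c3.toNat : Int) - 48) % 2 + ((c6.toNat : Int) - 48) % 2 + ((c10.toNat : Int) - 48) % 2)) := by omega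
  have e2 : (2 ∣ (((c2.toNat : Int) - 48) + ((c5.toNat : Int) - 48) + ((c9.toNat : Int) - 48) + ((c0.toNat : Int) - 48) + ((c3.toNat : Int) - 48) + ((c6.toNat : Int) - 48) + ((c10.toNat : Int) - 48))) ↔ (2 ∣ (((c2.toNat : Int) - 48) % 2 + ((c5.toNat : Int) - 48) % 2 + ((c9.toNat : Int) - 48) % 2 + ((c0.toNat : Int) - 48) % 2 + ((c3.toNat : Int) - 48) % 2 + ((c6.toNat : Int) - 48) % 2 + ((c10.toNat : Int) - 48) % 2)) := by omega
  have e4 : (2 ∣ (((c1.toNat : Int) - 48) + ((c2.toNat : Int) - 48) + ((c3.toNat : Int) - 48) + ((c7.toNat : Int) - 48) + ((c8.toNat : Int) - 48) + ((c9.toNat : Int) - 48) + ((c10.toNat : Int) - 48))) ↔ (2 ∣ (((c1.toNat : Int) - 48) % 2 + ((c2.toNat : Int) - 48) % 2 + ((c3.toNat : Int) - 48) % 2 + ((c7.toNat : Int) - 48) % 2 + ((c8.toNat : Int) - 48) % 2 + ((c9.toNat : Int) - 48) % 2 + ((c10.toNat : Int) - 48) % 2)) := by omega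
  have e8 : (2 ∣ (((c4.toNat : Int) - 48) + ((c5.toNat : Int) - 48) + ((c6.toNat : Int) - 48) + ((c7.toNat : Int) - 48) + ((c8.toNat : Int) - 48) + ((c9.toNat : Int) - 48) + ((c10.toNat : Int) - 48))) ↔ (2 ∣ (((c4.toNat : Int) - 48) % 2 + ((c5.toNat : Int) - 48) % 2 + ((c6.toNat : Int) - 48) % 2 + ((c7.toNat : Int) - 48) % 2 + ((c8.toNat : Int) - 48) % 2 + ((c9.toNat : Int) - 48) % 2 + ((c10.toNat : Int) - 48) % 2)) := by omega
  simp only [e1, e2, e4, e8]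
  have eAll := dvd_overall (if 2 ∣ (((c1.toNat : Int) - 48) % 2 + ((c4.toNat : Int) - 48) % 2 + ((c8.toNat : Int) - 48) % 2 + ((c0.toNat : Int) - 48) % 2 + ((c3.toNat : Int) - 48) % 2 + ((c6.toNat : Int) - 48) % 2 + ((c10.toNat : Int) - 48) % 2) then (0:Int) else 1) (if 2 ∣ (((c2.toNat : Int) - 48) % 2 + ((c5.toNat : Int) - 48) % 2 + ((c9.toNat : Int) - 48) % 2 + ((c0.toNat : Int) - 48) % 2 + ((c3.toNat : Int) - 48) % 2 + ((c6.toNat : Int) - 48) % 2 + ((c10.toNat : Int) - 48) % 2) then (0:Int) else 1) (if 2 ∣ (((c1.toNat : Int) - 48) % 2 + ((c2.toNat : Int) - 48) % 2 + ((c3.toNat : Int) - 48) % 2 + ((c7.toNat : Int) - 48) % 2 + ((c8.toNat : Int) - 48) % 2 + ((c9.toNat : Int) - 48) % 2 + ((c10.toNat : Int) - 48) % 2) then (0:Int) else 1) (if 2 ∣ (((c4.toNat : Int) - 48) % 2 + ((c5.toNat : Int) - 48) % 2 + ((c6.toNat : Int) - 48) % 2 + ((c7.toNat : Int) - 48) %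 2 + ((c8.toNat : Int) - 48) % 2 + ((c9.toNat : Int) - 48) % 2 + ((c10.toNat : Int) - 48) % 2) then (0:Int) else 1) ((c0.toNat : Int) - 48) ((c1.toNat : Int) - 48) ((c2.toNat : Int) - 48) ((c3.toNat : Int) - 48) ((c4.toNat : Int) - 48) ((c5.toNat : Int) - 48) ((c6.toNat : Int) - 48) ((c7.toNat : Int) - 48) ((c8.toNat : Int) - 48) ((c9.toNat : Int) - 48) ((c10.toNat : Int) - 48)
  simp only [eAll]
  simp only [Int.dvd_iff_emod_eq_zero]
  generalize hw0 : ((c0.toNat : Int) - 48) % 2 = w0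
  generalize hw1 : ((c1.toNat : Int) - 48) % 2 = w1
  generalize hw2 : ((c2.toNat : Int) - 48) % 2 = w2
  generalize hw3 : ((c3.toNat : Int) - 48) % 2 = w3
  generalize hw4 : ((c4.toNat : Int) - 48) % 2 = w4
  generalize hw5 : ((c5.toNat : Int) - 48) % 2 = w5
  generalize hw6 : ((c6.toNat : Int) - 48) % 2 = w6
  generalize hw7 : ((c7.toNat : Int) - 48) % 2 = w7
  generalize hw8 : ((c8.toNat : Int) - 48) % 2 = w8
  generalize hw9 : ((c9.toNat : Int) - 48) % 2 = w9
  generalize hw10 : ((c10.toNat : Int) - 48) % 2 = w10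
  have hb0 : w0 = 0 ∨ w0 = 1 := by rw [← hw0]; exact Int.emod_two_eq _
  have hb1 : w1 = 0 ∨ w1 = 1 := by rw [← hw1]; exact Int.emod_two_eq _
  have hb2 : w2 = 0 ∨ w2 = 1 := by rw [← hw2]; exact Int.emod_two_eq _
  have hb3 : w3 = 0 ∨ w3 = 1 := by rw [← hw3]; exact Int.emod_two_eq _
  have hb4 : w4 = 0 ∨ w4 = 1 := by rw [← hw4]; exact Int.emod_two_eq _
  have hb5 : w5 = 0 ∨ w5 = 1 := by rw [← hw5]; exact Int.emod_two_eq _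
  have hb6 : w6 = 0 ∨ w6 = 1 := by rw [← hw6]; exact Int.emod_two_eq _
  have hb7 : w7 = 0 ∨ w7 = 1 := by rw [← hw7]; exact Int.emod_two_eq _
  have hb8 : w8 = 0 ∨ w8 = 1 := by rw [← hw8]; exact Int.emod_two_eq _
  have hb9 : w9 = 0 ∨ w9 = 1 := by rw [← hw9]; exact Int.emod_two_eq _
  have hb10 : w10 = 0 ∨ w10 = 1 := by rw [← hw10]; exact Int.emod_two_eq _
  clear hw0 hw1 hw2 hw3 hw4 hw5 hw6 hw7 hw8 hw9 hw10
  rcases hb0 with rfl|rfl <;> rcases hb1 with rfl|rfl <;> rcases hb2 with rfl|rfl <;> rcases hb3 with rfl|rfl <;> rcases hb4 with rfl|rfl <;> rcases hb5 with rfl|rfl <;> rcases hb6 with rfl|rfl <;> rcases hb7 with rfl|rfl <;> rcases hb8 with rfl|rfl <;> rcases hb9 with rfl|rfl <;> rcases hb10 with rfl|rfl <;> rfl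

-- ===== VERDICT (by name: the statement is the Claim_ definition above) =====
theorem criar_quadro_spec : Claim_equal_criar_quadro := by
  intro bits _ hpre
  unfold Spec_criar_quadro
  obtain ⟨hlen, hdig⟩ := hpre
  rw [show bits = String.ofList bits.toList from (String.ofList_toList : String.ofList bits.toList = bits).symm]
  revert hlen hdig
  generalize bits.toList = l
  intro hlen hdig
  rcases l with _ | ⟨c0, l⟩; · simp at hlen
  rcases l with _ | ⟨c1, l⟩; · simp at hlen
  rcases l with _ | ⟨c2, l⟩; · simp at hlen
  rcases l with _ | ⟨c3, l⟩; · simp at hlen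
  rcases l with _ | ⟨c4, l⟩; · simp at hlen
  rcases l with _ | ⟨c5, l⟩; · simp at hlen
  rcases l with _ | ⟨c6, l⟩; · simp at hlen
  rcases l with _ | ⟨c7, l⟩; · simp at hlen
  rcases l with _ | ⟨c8, l⟩; · simp at hlen
  rcases l with _ | ⟨c9, l⟩; · simp at hlen
  rcases l with _ | ⟨c10, l⟩; · simp at hlen
  apply criar_quadro_core
  intro c hc
  apply ofChars?_digit
  exact List.all_eq_true.mp hdig c (by simp only [List.take]; simpa using hc)
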